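-- pv_equiv track=rewrite | github.com/XuQiao/Spooky | kernel/featureExt.py | make_tupl
-- ===== SOURCE A (Python) =====
-- def make_tupl(sentence , n=3):
--     """function to make tuples of n size given a sentence and n"""
--     list_of_tuple = []
--     word_1 = []
--     for i in list(range(sentence.__len__()-3)):
--         tuple_1 = (sentence[i], sentence[i+1], sentence[i+2])
--         list_of_tuple.append(tuple_1)
--         word_1.append(sentence[i+3])
--     return (list_of_tuple, word_1)
-- ===== SOURCE B (Python) =====
-- def make_tupl(sentence, n=3):
--     """function to make tuples of n size given a sentence and n"""
--     quads = list(zip(sentence, sentence[1:], sentence[2:], sentence[3:]))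
--     return ([(a, b, c) for a, b, c, _ in quads], [d for _, _, _, d in quads])
-- ===== Notes on version B (the rewrite author's own statement) =====
-- stated objective: idiomatic
-- what changed: Replaces the index loop over range(len-3) with a single zip over four offset slices, reading each quadruple (a,b,c,d) directly instead of indexing sentence[i..i+3].
import Mathlib
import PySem

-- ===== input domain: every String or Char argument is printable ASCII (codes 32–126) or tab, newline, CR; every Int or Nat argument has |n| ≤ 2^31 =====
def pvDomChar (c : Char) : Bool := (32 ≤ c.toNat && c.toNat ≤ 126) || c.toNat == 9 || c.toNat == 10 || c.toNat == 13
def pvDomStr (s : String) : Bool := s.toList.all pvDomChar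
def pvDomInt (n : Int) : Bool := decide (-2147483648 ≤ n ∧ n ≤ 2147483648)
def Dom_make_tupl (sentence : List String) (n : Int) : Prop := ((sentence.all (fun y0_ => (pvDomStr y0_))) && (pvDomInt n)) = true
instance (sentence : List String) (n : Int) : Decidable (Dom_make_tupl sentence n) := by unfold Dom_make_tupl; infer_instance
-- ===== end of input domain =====

-- B replaces A's index loop over range(len-3) with one zip over four offset slices (idiomatic; same cost).


-- ===== PORT A =====
-- loop 'for i in range(len(sentence)-3)', appending the trigram and the following word;
-- indices i..i+3 are always in range, so pyGetD is exact here.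
def make_tupl (sentence : List String) (n : Int) : (List (String × String × String)) × List String :=
  (PySem.List.pyRange 0 ((sentence.length : Int) - 3) 1).foldl
    (fun acc i =>
      let tuple_1 := (PySem.List.pyGetD sentence i "",
                      PySem.List.pyGetD sentence (i+1) "",
                      PySem.List.pyGetD sentence (i+2) "")
      (acc.1 ++ [tuple_1], acc.2 ++ [PySem.List.pyGetD sentence (i+3) ""]))
    ([], [])

-- ===== PORT B =====
-- zip of the list with its three offset slices; project the quadruples.
def make_tupl_alt (sentence : List String) (n : Int) : (List (String × String × String)) × List String :=
  let quads := sentence.zip ((sentence.drop 1).zip ((sentence.drop 2).zip (sentence.drop 3)))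
  (quads.map (fun q => (q.1, q.2.1, q.2.2.1)), quads.map (fun q => q.2.2.2))

-- ===== PRECONDITION & SPEC =====
def Spec_make_tupl (sentence : List String) (n : Int) (out : (List (String × String × String)) × List String) : Prop := out = make_tupl_alt sentence n
instance (sentence : List String) (n : Int) (out : (List (String × String × String)) × List String) : Decidable (Spec_make_tupl sentence n out) := by unfold Spec_make_tupl; infer_instance

-- ===== CLAIM (what is proved, stated in full; the proofs are below) =====
def Claim_equal_make_tupl : Prop := ∀ (sentence : List String) (n : Int), Dom_make_tupl sentence n → Spec_make_tupl sentence n (make_tupl sentence n)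

-- ===== LEMMAS AND PROOFS =====

lemma pget (s : List String) (j : Nat) (hj : j < s.length) :
    PySem.List.pyGetD s (j : Int) "" = s[j] := by
  rw [PySem.List.pyGetD_natCast]
  simp [List.getD, hj]

lemma foldl_pair_append {α β γ : Type} (f : α → β) (g : α → γ) (l : List α)
    (xs : List β) (ys : List γ) :
    l.foldl (fun acc i => (acc.1 ++ [f i], acc.2 ++ [g i])) (xs, ys)
      = (xs ++ l.map f, ys ++ l.map g) := by
  induction l generalizing xs ys with
  | nil => simp
  | cons a l ih => simp [List.foldl, ih]

theorem make_tupl_spec : Claim_equal_make_tupl := by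
  intro s nn _hd
  show make_tupl s nn = make_tupl_alt s nn
  unfold make_tupl make_tupl_alt
  rw [foldl_pair_append
        (fun i => (PySem.List.pyGetD s i "", PySem.List.pyGetD s (i+1) "", PySem.List.pyGetD s (i+2) ""))
        (fun i => PySem.List.pyGetD s (i+3) "")]
  have hq : (s.zip ((s.drop 1).zip ((s.drop 2).zip (s.drop 3)))).length = s.length - 3 := by
    simp; omega
  refine Prod.ext ?_ ?_ <;> ·
    simp only [List.nil_append]
    apply List.ext_getElem
    · simp [PySem.List.length_pyRange_one]; omega
    · intro k h1 h2
      simp only [List.length_map, PySem.List.length_pyRange_one] at h1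
      have hk3 : k + 3 < s.length := by omega
      simp [PySem.List.getElem_pyRange_one] at h2 ⊢
      first
      | rw [show ((k:Int) + 3 = (((k+3:Nat)):Int)) by push_cast; ring,
            pget s (k+3) hk3]
        simp [show 3 + k = k + 3 from by omega]
      | refine ⟨?_, ?_, ?_⟩
        · simp [show k < s.length from by omega]
        · rw [show ((k:Int) + 1 = (((k+1:Nat)):Int)) by push_cast; ring,
              pget s (k+1) (by omega)]
        · rw [show ((k:Int) + 2 = (((k+2:Nat)):Int)) by push_cast; ring,
              pget s (k+2) (by omega)]
          simp [show 2 + k = k + 2 from by omega]
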